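-- pv_equiv track=rewrite | github.com/X1AOX1A/Datasets | CoCo_Entities/CoCo_Entities_Formatted/format_coco_entities.py | get_entity_start_end_indices
-- ===== SOURCE A (Python) =====
-- def get_entity_start_end_indices(caption, det_sequences):
--     """Get the start and end indices of entities in the caption
--     Args:
--         caption (str): the caption of CoCo Entities,
--             e.g. "a woman and man sits on a wooden bench"
--         det_sequences (list): list of entity tags,
--             e.g. ['woman', 'woman', None, 'man', None, None, 'bench', 'bench', 'bench']
--     Returns:
--         entity_start_end_indices (list): [[start_idx, end_idx, entity_tag]]
--             e.g. [[0, 7], [12, 15], [24, 38]]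
--     """
--     off_set, prev_end_idx = 0, 0
--     prev_entity = None
--     entity_start_end_indices = []
--     caption_word = caption.split(" ")
--     assert len(caption_word) == len(det_sequences)
--     for i, (word, entity) in enumerate(zip(caption_word, det_sequences)):
--         if entity == prev_entity:
--             end_idx = len(word) if i==0 else min(prev_end_idx+len(word)+1, len(caption))
--             if entity not in [None, "_"]:
--                 entity_start_end_indices[-1][1] = end_idx
--         else:
--             start_idx = off_set
--             end_idx = start_idx + len(word)
--             if entity not in [None, "_"]:
--                 entity_start_end_indices.append([start_idx, end_idx])
--             prev_entity = entity
--         off_set = end_idx+1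
--         prev_end_idx = end_idx
--
--     return entity_start_end_indices
-- ===== SOURCE B (Python) =====
-- def _group(off, pairs):
--     """Emit [start, end] spans for maximal runs of consecutive identical tags."""
--     if not pairs:
--         return []
--     (t, wlen), rest = pairs[0], pairs[1:]
--     e = off + wlen
--     while rest and rest[0][0] == t:
--         e = e + 1 + rest[0][1]
--         rest = rest[1:]
--     spans = [] if (t is None or t == "_") else [[off, e]]
--     return spans + _group(e + 1, rest)
--
--
-- def get_entity_start_end_indices(caption, det_sequences):
--     words = caption.split(" ")
--     assert len(words) == len(det_sequences)
--     return _group(0, list(zip(det_sequences, [len(w) for w in words])))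
-- ===== Notes on version B (the rewrite author's own statement) =====
-- stated objective: alternative
-- what changed: Replaces A's stateful indexed loop (prev-entity tracking, in-place mutation of the last span's end, min-cap against len(caption)) by a two-phase decomposition: zip tags with word lengths, then group maximal runs of consecutive equal tags, emitting one span per non-None/non-underscore run; the cap is dropped since cumulative offsets never exceed len(caption).
import Mathlib
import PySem

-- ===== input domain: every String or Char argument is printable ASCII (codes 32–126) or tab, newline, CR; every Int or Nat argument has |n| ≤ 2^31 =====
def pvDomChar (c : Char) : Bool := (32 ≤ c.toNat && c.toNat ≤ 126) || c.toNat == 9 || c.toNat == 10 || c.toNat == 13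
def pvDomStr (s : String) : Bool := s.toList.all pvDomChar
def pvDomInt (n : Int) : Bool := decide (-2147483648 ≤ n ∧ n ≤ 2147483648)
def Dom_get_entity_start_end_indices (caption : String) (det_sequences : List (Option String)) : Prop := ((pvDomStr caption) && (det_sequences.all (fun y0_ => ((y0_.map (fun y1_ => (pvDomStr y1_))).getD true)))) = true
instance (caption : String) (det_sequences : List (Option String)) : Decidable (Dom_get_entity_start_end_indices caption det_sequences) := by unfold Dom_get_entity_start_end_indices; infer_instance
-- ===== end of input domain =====

-- B replaces A's single stateful loop (prev-entity tracking, in-place mutation of the last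
-- span, min-cap against len(caption)) by a different decomposition: zip tags with word
-- lengths, then group maximal runs of consecutive equal tags, one span per non-None/"_" run.

-- ===== PORT A =====
-- entity_start_end_indices[-1][1] = e  (Python reaches this only with a nonempty list;
-- the 'none' arm is unreachable there, where Python would raise IndexError)
def pvSetLast1 (acc : List (List Int)) (e : Int) : List (List Int) :=
  match acc.getLast? with
  | some sp => acc.dropLast ++ [[sp.headI, e]]
  | none => acc

-- the for-loop of A: state (i, off_set, prev_end_idx, prev_entity, entity_start_end_indices)
def pvLoopA (cap : Int) : Nat → Int → Int → Option String → List (List Int) →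
    List (String × Option String) → List (List Int)
  | _, _, _, _, acc, [] => acc
  | i, off, pe, prev, acc, (w, t) :: rest =>
    if t = prev then
      let e : Int := if i = 0 then PySem.Str.len w else min (pe + PySem.Str.len w + 1) cap
      let acc2 := if t = none ∨ t = some "_" then acc else pvSetLast1 acc e
      pvLoopA cap (i+1) (e+1) e prev acc2 rest
    else
      let s := off
      let e := s + PySem.Str.len w
      let acc2 := if t = none ∨ t = some "_" then acc else acc ++ [[s, e]]
      pvLoopA cap (i+1) (e+1) e t acc2 rest

-- the assert is Pre_; zip mirrors Python's zip truncation
def get_entity_start_end_indices (caption : String) (det_sequences : List (Option String)) : List (List Int) :=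
  let caption_word := (PySem.Str.split? caption " ").getD []
  pvLoopA (PySem.Str.len caption) 0 0 0 none [] (caption_word.zip det_sequences)

-- ===== PORT B =====
-- the inner while loop of _group: absorb the run of tags equal to t, returning (end, rest)
def pvTakeRun (t : Option String) (e : Int) : List (Option String × Int) → Int × List (Option String × Int)
  | [] => (e, [])
  | (t2, L) :: rest => if t2 = t then pvTakeRun t (e + 1 + L) rest else (e, (t2, L) :: rest)

-- (termination measure for pvGroup, cited by its decreasing_by)
theorem pvTakeRun_length_le (t : Option String) (e : Int) (ps : List (Option String × Int)) :
    (pvTakeRun t e ps).2.length ≤ ps.length := by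
  induction ps generalizing e with
  | nil => simp [pvTakeRun]
  | cons p rest ih =>
    obtain ⟨t2, L⟩ := p
    by_cases h : t2 = t <;> simp [pvTakeRun, h]
    exact Nat.le_succ_of_le (ih _)

-- _group(off, pairs)
def pvGroup (off : Int) : List (Option String × Int) → List (List Int)
  | [] => []
  | (t, L) :: rest =>
    let r := pvTakeRun t (off + L) rest
    (if t = none ∨ t = some "_" then [] else [[off, r.1]]) ++ pvGroup (r.1 + 1) r.2
termination_by ps => ps.length
decreasing_by exact Nat.lt_succ_of_le (pvTakeRun_length_le _ _ _)

def get_entity_start_end_indices_alt (caption : String) (det_sequences : List (Option String)) : List (List Int) :=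
  let words := (PySem.Str.split? caption " ").getD []
  pvGroup 0 (det_sequences.zip (words.map (fun w => PySem.Str.len w)))

-- ===== PRECONDITION & SPEC =====
-- Pre_ excludes exactly the inputs where A's assert fails (AssertionError):
-- len(caption.split(" ")) must equal len(det_sequences).
def Pre_get_entity_start_end_indices (caption : String) (det_sequences : List (Option String)) : Prop :=
  ((PySem.Str.split? caption " ").getD []).length = det_sequences.length
instance (caption : String) (det_sequences : List (Option String)) : Decidable (Pre_get_entity_start_end_indices caption det_sequences) := by unfold Pre_get_entity_start_end_indices; infer_instance

def pvWitness_get_entity_start_end_indices : String × List (Option String) :=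
  ("a woman and man", [some "woman", some "woman", none, some "man"])

def Spec_get_entity_start_end_indices (caption : String) (det_sequences : List (Option String)) (out : List (List Int)) : Prop := out = get_entity_start_end_indices_alt caption det_sequences
instance (caption : String) (det_sequences : List (Option String)) (out : List (List Int)) : Decidable (Spec_get_entity_start_end_indices caption det_sequences out) := by unfold Spec_get_entity_start_end_indices; infer_instance

-- ===== CLAIM (what is proved, stated in full; the proofs are below) =====
def Claim_equal_get_entity_start_end_indices : Prop := ∀ (caption : String) (det_sequences : List (Option String)), Dom_get_entity_start_end_indices caption det_sequences → Pre_get_entity_start_end_indices caption det_sequences → Spec_get_entity_start_end_indices caption det_sequences (get_entity_start_end_indices caption det_sequences)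

-- ===== LEMMAS AND PROOFS =====

-- the split(" ") pieces account for the whole caption: Σ|word| + #words = |caption| + 1
theorem pv_go_sum : ∀ (fuel : Nat) (l cur : List Char) (acc : List (List Char)),
    l.length < fuel →
    ((PySem.Chars.splitOn.go [' '] fuel l cur acc).map List.length).sum
      + (PySem.Chars.splitOn.go [' '] fuel l cur acc).length
    = ((acc.map List.length).sum + acc.length) + (cur.length + l.length + 1) := by
  intro fuel
  induction fuel with
  | zero => intro l cur acc h; omega
  | succ f ih =>
    intro l cur acc h
    cases l with
    | nil => simp [PySem.Chars.splitOn.go]; omega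
    | cons c rest =>
      by_cases hc : c = ' '
      · have : PySem.Chars.splitOn.go [' '] (f+1) (c :: rest) cur acc
            = PySem.Chars.splitOn.go [' '] f rest [] (cur.reverse :: acc) := by
          simp [PySem.Chars.splitOn.go, List.isPrefixOf, hc]
        rw [this, ih rest [] (cur.reverse :: acc) (by simpa using h)]
        simp; omega
      · have hc2 : ¬ (' ' = c) := fun h => hc h.symm
        have : PySem.Chars.splitOn.go [' '] (f+1) (c :: rest) cur acc
            = PySem.Chars.splitOn.go [' '] f rest (c :: cur) acc := by
          simp [PySem.Chars.splitOn.go, List.isPrefixOf, hc2]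
        rw [this, ih rest (c :: cur) acc (by simpa using h)]
        simp; omega

theorem pv_split_sum (l : List Char) :
    ((PySem.Chars.splitOn l [' ']).map List.length).sum + (PySem.Chars.splitOn l [' ']).length
      = l.length + 1 := by
  have := pv_go_sum (l.length + 1) l [] [] (by omega)
  simpa [PySem.Chars.splitOn] using this

theorem pvSetLast1_append (acc : List (List Int)) (s e0 e : Int) :
    pvSetLast1 (acc ++ [[s, e0]]) e = acc ++ [[s, e]] := by
  simp [pvSetLast1]

def pvGA (off : Int) (prev : Option String) (acc : List (List Int)) :
    List (Option String × Int) → List (List Int)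
  | [] => acc
  | (t, L) :: rest =>
    if t = prev then pvGA (off + L + 1) prev (if t = none ∨ t = some "_" then acc else pvSetLast1 acc (off + L)) rest
    else pvGA (off + L + 1) t (if t = none ∨ t = some "_" then acc else acc ++ [[off, off + L]]) rest

theorem pvGroup_skip (t : Option String) (hskip : t = none ∨ t = some "_")
    (off L : Int) (rest : List (Option String × Int)) :
    pvGroup off ((t, L) :: rest) = pvGroup (off + L + 1) rest := by
  cases rest with
  | nil => simp [pvGroup, pvTakeRun, hskip]
  | cons p r =>
    obtain ⟨t2, L2⟩ := p
    by_cases h2 : t2 = t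
    · rw [pvGroup, pvGroup]
      simp only [pvTakeRun, h2, if_pos, hskip]
    · rw [pvGroup]
      simp [pvTakeRun, h2, hskip, pvGroup]

def pvConv (ps : List (String × Option String)) : List (Option String × Int) :=
  ps.map (fun p => (p.2, PySem.Str.len p.1))

theorem pv_sum_nonneg (ps : List (String × Option String)) :
    0 ≤ ((ps.map (fun p => PySem.Str.len p.1 + 1)).sum) := by
  apply List.sum_nonneg
  intro x hx
  simp only [List.mem_map] at hx
  obtain ⟨p, _, rfl⟩ := hx
  have : (0:Int) ≤ PySem.Str.len p.1 := by simp [PySem.Str.len]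
  omega

theorem pvLoopA_eq_pvGA (cap : Int) : ∀ (ps : List (String × Option String)) (i : Nat) (pe : Int)
    (prev : Option String) (acc : List (List Int)), 1 ≤ i →
    pe + ((ps.map (fun p => PySem.Str.len p.1 + 1)).sum) = cap →
    pvLoopA cap i (pe + 1) pe prev acc ps = pvGA (pe + 1) prev acc (pvConv ps) := by
  intro ps
  induction ps with
  | nil => intro i pe prev acc h1 h2; simp [pvLoopA, pvConv, pvGA]
  | cons p rest ih =>
    intro i pe prev acc h1 h2
    obtain ⟨w, t⟩ := p
    have hrest : 0 ≤ ((rest.map (fun p => PySem.Str.len p.1 + 1)).sum) := pv_sum_nonneg rest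
    have hlen : (0:Int) ≤ PySem.Str.len w := by simp [PySem.Str.len]
    simp only [List.map_cons, List.sum_cons] at h2
    have hi : i ≠ 0 := by omega
    have hmin : min (pe + PySem.Str.len w + 1) cap = pe + PySem.Str.len w + 1 := by omega
    by_cases ht : t = prev
    · rw [pvLoopA, pvConv]
      simp only [List.map_cons, ht, if_pos, hi, hmin]
      rw [pvGA]
      have harith : pe + PySem.Str.len w + 1 = pe + 1 + PySem.Str.len w + 1 - 1 := by ring
      have := ih (i+1) (pe + PySem.Str.len w + 1) prev
        (if prev = none ∨ prev = some "_" then acc else pvSetLast1 acc (pe + PySem.Str.len w + 1))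
        (by omega) (by omega)
      rw [show pe + 1 + PySem.Str.len w = pe + PySem.Str.len w + 1 by ring]
      simpa [pvConv, ht] using this
    · rw [pvLoopA, pvConv]
      simp only [List.map_cons, ht]
      rw [pvGA]
      simp only [if_neg ht]
      have := ih (i+1) (pe + 1 + PySem.Str.len w) t
        (if t = none ∨ t = some "_" then acc else acc ++ [[pe + 1, pe + 1 + PySem.Str.len w]])
        (by omega) (by omega)
      simpa [pvConv] using this

theorem pvGA_eq_pvGroup : ∀ (n : Nat) (ps : List (Option String × Int)), ps.length = n →
    (∀ (off : Int) (prev : Option String) (acc : List (List Int)),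
        (prev = none ∨ prev = some "_") → pvGA off prev acc ps = acc ++ pvGroup off ps)
    ∧ (∀ (tg : Option String), ¬ (tg = none ∨ tg = some "_") →
        ∀ (e s : Int) (acc : List (List Int)),
          pvGA (e + 1) tg (acc ++ [[s, e]]) ps
            = acc ++ [s, (pvTakeRun tg e ps).1] :: pvGroup ((pvTakeRun tg e ps).1 + 1) (pvTakeRun tg e ps).2) := by
  intro n
  induction n using Nat.strong_induction_on with
  | _ n IH =>
    intro ps hn
    constructor
    · intro off prev acc hskip
      cases ps with
      | nil => simp [pvGA, pvGroup]
      | cons p rest =>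
        obtain ⟨t, L⟩ := p
        have hlt : rest.length < n := by simp at hn; omega
        by_cases ht : t = prev
        · subst ht
          have hts : t = none ∨ t = some "_" := hskip
          rw [pvGA]
          simp only [if_pos hts]
          rw [(IH _ hlt rest rfl).1 _ _ _ hskip, pvGroup_skip t hts]
          simp
        · by_cases hts : t = none ∨ t = some "_"
          · rw [pvGA]
            simp only [if_neg ht, if_pos hts]
            rw [(IH _ hlt rest rfl).1 _ _ _ hts, pvGroup_skip t hts]
          · rw [pvGA]
            simp only [if_neg ht, if_neg hts]
            rw [(IH _ hlt rest rfl).2 t hts (off + L) off acc]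
            rw [pvGroup]
            simp only [if_neg hts]
            simp
    · intro tg htg e s acc
      cases ps with
      | nil => simp [pvGA, pvGroup, pvTakeRun]
      | cons p rest =>
        obtain ⟨t, L⟩ := p
        have hlt : rest.length < n := by simp at hn; omega
        by_cases ht : t = tg
        · subst ht
          rw [pvGA]
          simp only [if_neg htg]
          rw [pvSetLast1_append]
          have heq : e + 1 + L = e + 1 + L := rfl
          rw [show e + 1 + L + 1 = (e + 1 + L) + 1 from rfl]
          rw [(IH _ hlt rest rfl).2 t htg (e + 1 + L) s acc]
          simp [pvTakeRun]
        · rw [pvGA]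
          simp only [if_neg ht]
          rw [show (pvTakeRun tg e ((t, L) :: rest)) = (e, (t, L) :: rest) from by
            simp [pvTakeRun, ht]]
          by_cases hts : t = none ∨ t = some "_"
          · simp only [if_pos hts]
            rw [(IH _ hlt rest rfl).1 _ _ _ hts, pvGroup_skip t hts]
            simp
          · simp only [if_neg hts]
            rw [show acc ++ [[s, e]] = acc ++ [[s, e]] from rfl]
            rw [(IH _ hlt rest rfl).2 t hts (e + 1 + L) (e + 1) (acc ++ [[s, e]])]
            rw [pvGroup]
            simp only [if_neg hts]
            simp

theorem pvConv_zip (xs : List String) (ys : List (Option String)) :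
    pvConv (xs.zip ys) = ys.zip (xs.map PySem.Str.len) := by
  unfold pvConv
  induction xs generalizing ys with
  | nil => simp
  | cons x xs ih => cases ys with
    | nil => simp
    | cons y ys => simpa using ih ys

theorem pvLoopA_start (cap : Int) (ps : List (String × Option String))
    (hinv : ((ps.map (fun p => PySem.Str.len p.1 + 1)).sum) = cap + 1) :
    pvLoopA cap 0 0 0 none [] ps = pvGA 0 none [] (pvConv ps) := by
  cases ps with
  | nil => simp [pvLoopA, pvConv, pvGA]
  | cons p rest =>
    obtain ⟨w, t⟩ := p
    simp only [List.map_cons, List.sum_cons] at hinv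
    have hrest : 0 ≤ ((rest.map (fun p => PySem.Str.len p.1 + 1)).sum) := pv_sum_nonneg rest
    rw [pvLoopA, pvConv, List.map_cons, pvGA]
    by_cases h0 : t = none
    · simp only [h0, if_pos]
      have := pvLoopA_eq_pvGA cap rest 1 (PySem.Str.len w) none [] (le_refl 1) (by omega)
      simpa [pvConv] using this
    · simp only [h0, if_false]
      have := pvLoopA_eq_pvGA cap rest 1 (PySem.Str.len w) t
        (if t = none ∨ t = some "_" then [] else [[0, 0 + PySem.Str.len w]]) (le_refl 1) (by omega)
      simpa [pvConv, h0] using this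

theorem pv_len_sum (ws : List (List Char)) :
    (((ws.map String.ofList).map (fun p => PySem.Str.len p + 1)).sum)
      = ((ws.map List.length).sum : Int) + ws.length := by
  induction ws with
  | nil => simp
  | cons w ws ih =>
    simp only [List.map_cons, List.sum_cons, ih]
    simp [PySem.Str.len]
    ring

theorem pv_zip_sum (ws : List (List Char)) (ds : List (Option String)) (h : ws.length = ds.length) :
    ((((ws.map String.ofList).zip ds).map (fun p => PySem.Str.len p.1 + 1)).sum)
      = ((ws.map List.length).sum : Int) + ws.length := by
  have hfst : ((ws.map String.ofList).zip ds).map Prod.fst = ws.map String.ofList :=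
    List.map_fst_zip (by simp [h])
  rw [show (fun (p : String × Option String) => PySem.Str.len p.1 + 1)
        = ((fun w => PySem.Str.len w + 1) ∘ (Prod.fst : String × Option String → String)) from rfl,
      ← List.map_map, hfst, pv_len_sum]

theorem pv_main (caption : String) (ds : List (Option String))
    (hpre : ((PySem.Str.split? caption " ").getD []).length = ds.length) :
    get_entity_start_end_indices caption ds = get_entity_start_end_indices_alt caption ds := by
  have hsplit : PySem.Str.split? caption " " = some ((PySem.Chars.splitOn caption.toList [' ']).map String.ofList) := by
    simp [PySem.Str.split?, PySem.Chars.split?]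
  rw [get_entity_start_end_indices, get_entity_start_end_indices_alt]
  rw [hsplit] at hpre ⊢
  simp only [Option.getD_some] at hpre ⊢
  simp only [List.length_map] at hpre
  have hsum := pv_split_sum caption.toList
  have hcap : PySem.Str.len caption = (caption.toList.length : Int) := rfl
  rw [pvLoopA_start _ _ (by rw [pv_zip_sum _ _ hpre, hcap]; exact_mod_cast hsum)]
  rw [(pvGA_eq_pvGroup _ _ rfl).1 _ _ _ (Or.inl rfl)]
  rw [pvConv_zip]
  rfl


-- ===== VERDICT (by name: the statement is the Claim_ definition above) =====
theorem get_entity_start_end_indices_spec : Claim_equal_get_entity_start_end_indices := by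
  intro caption ds _hdom hpre
  show get_entity_start_end_indices caption ds = get_entity_start_end_indices_alt caption ds
  exact pv_main caption ds hpre
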